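-- pv_equiv track=rewrite | github.com/ryanlane/document-manager | backend/src/segment/segment_entries.py | find_last_headers_before
-- ===== SOURCE A (Python) =====
-- def find_last_headers_before(text: str, position: int) -> str:
--     """
--     Find the most recent markdown headers before a given position.
--     """
--     text_before = text[:position]
--     lines = text_before.split('\n')
--
--     current_h1 = None
--     current_h2 = None
--     current_h3 = None
--
--     for line in lines:
--         line_stripped = line.strip()
--         if line_stripped.startswith('# ') and not line_stripped.startswith('##'):
--             current_h1 = line_stripped
--             current_h2 = None
--             current_h3 = None
--         elif line_stripped.startswith('## ') and not line_stripped.startswith('###'):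
--             current_h2 = line_stripped
--             current_h3 = None
--         elif line_stripped.startswith('### '):
--             current_h3 = line_stripped
--
--     context_parts = []
--     if current_h1:
--         context_parts.append(current_h1)
--     if current_h2:
--         context_parts.append(current_h2)
--     if current_h3:
--         context_parts.append(current_h3)
--
--     return '\n'.join(context_parts)
-- ===== SOURCE B (Python) =====
-- def find_last_headers_before(text: str, position: int) -> str:
--     """
--     Find the most recent markdown headers before a given position.
--     Reverse scan: walk lines backwards, record the nearest h3 (only while no
--     h2/h1 seen yet) and h2 (only while no h1 seen), and stop at the first h1.
--     """
--     h1 = h2 = h3 = None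
--     for line in reversed(text[:position].split('\n')):
--         s = line.strip()
--         if s.startswith('# ') and not s.startswith('##'):
--             h1 = s
--             break
--         elif s.startswith('## ') and not s.startswith('###'):
--             if h2 is None:
--                 h2 = s
--         elif s.startswith('### '):
--             if h2 is None and h3 is None:
--                 h3 = s
--     return '\n'.join([h for h in (h1, h2, h3) if h])
-- ===== Notes on version B (the rewrite author's own statement) =====
-- stated objective: alternative
-- what changed: A scans all lines forward keeping h1/h2/h3 state with reset-clearing; B scans the lines backward, records the nearest h3/h2 under 'no larger header seen yet' guards, and breaks at the first h1 so earlier lines are never examined.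
import Mathlib
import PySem

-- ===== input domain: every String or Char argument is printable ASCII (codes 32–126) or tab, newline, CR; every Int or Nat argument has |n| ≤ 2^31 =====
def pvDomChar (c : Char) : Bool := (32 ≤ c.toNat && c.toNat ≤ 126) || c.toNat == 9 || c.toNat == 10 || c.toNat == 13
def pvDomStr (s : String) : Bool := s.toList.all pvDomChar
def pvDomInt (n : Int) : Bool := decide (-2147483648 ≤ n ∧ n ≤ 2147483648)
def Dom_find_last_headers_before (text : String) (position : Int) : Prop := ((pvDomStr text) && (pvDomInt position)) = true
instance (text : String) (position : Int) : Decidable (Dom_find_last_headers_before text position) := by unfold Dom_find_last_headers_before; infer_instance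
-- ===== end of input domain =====

-- B replaces A's forward stateful scan (with header resets) by a backward scan that
-- records the nearest h3/h2 under "nothing bigger seen yet" guards and stops at the
-- first h1; objective: alternative (early exit at the last h1).

-- shared header predicates (identical in both Pythons)
def pvIsH1 (s : List Char) : Bool :=
  PySem.Chars.startswith s "# ".toList && !PySem.Chars.startswith s "##".toList
def pvIsH2 (s : List Char) : Bool :=
  PySem.Chars.startswith s "## ".toList && !PySem.Chars.startswith s "###".toList
def pvIsH3 (s : List Char) : Bool :=
  PySem.Chars.startswith s "### ".toList

-- ===== PORT A =====
-- one iteration of A's forward for-loop over (h1, h2, h3)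
def pvStepA (st : Option (List Char) × Option (List Char) × Option (List Char))
    (line : List Char) : Option (List Char) × Option (List Char) × Option (List Char) :=
  let s := PySem.Chars.strip line
  if pvIsH1 s then (some s, none, none)
  else if pvIsH2 s then (st.1, some s, none)
  else if pvIsH3 s then (st.1, st.2.1, some s)
  else st

-- 'if current_h: context_parts.append(current_h)'  (Python truthiness: not None and nonempty)
def pvAppendIf (parts : List (List Char)) (o : Option (List Char)) : List (List Char) :=
  match o with
  | some l => if l.isEmpty then parts else parts ++ [l]
  | none => parts

def find_last_headers_before (text : String) (position : Int) : String :=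
  let text_before := PySem.List.slice text.toList none (some position)
  let lines := PySem.Chars.splitOn text_before ['\n']
  let st := lines.foldl pvStepA (none, none, none)
  let parts := pvAppendIf (pvAppendIf (pvAppendIf [] st.1) st.2.1) st.2.2
  String.ofList (PySem.Chars.join ['\n'] parts)

-- ===== PORT B =====
-- B's reversed for-loop with break: recursion over the reversed line list,
-- carrying the h2/h3 accumulators; returning at an h1 line is the 'break'.
def pvScanB : List (List Char) → Option (List Char) → Option (List Char) →
    Option (List Char) × Option (List Char) × Option (List Char)
  | [], h2, h3 => (none, h2, h3)
  | line :: rest, h2, h3 =>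
    let s := PySem.Chars.strip line
    if pvIsH1 s then (some s, h2, h3)
    else if pvIsH2 s then pvScanB rest (if h2.isNone then some s else h2) h3
    else if pvIsH3 s then pvScanB rest h2 (if h2.isNone && h3.isNone then some s else h3)
    else pvScanB rest h2 h3

def find_last_headers_before_alt (text : String) (position : Int) : String :=
  let lines := PySem.Chars.splitOn (PySem.List.slice text.toList none (some position)) ['\n']
  let st := pvScanB lines.reverse none none
  String.ofList (PySem.Chars.join ['\n']
    (([st.1, st.2.1, st.2.2].filterMap id).filter (fun l => !l.isEmpty)))

-- ===== PRECONDITION & SPEC =====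
def Spec_find_last_headers_before (text : String) (position : Int) (out : String) : Prop := out = find_last_headers_before_alt text position
instance (text : String) (position : Int) (out : String) : Decidable (Spec_find_last_headers_before text position out) := by unfold Spec_find_last_headers_before; infer_instance

-- ===== CLAIM (what is proved, stated in full; the proofs are below) =====
def Claim_equal_find_last_headers_before : Prop := ∀ (text : String) (position : Int), Dom_find_last_headers_before text position → Spec_find_last_headers_before text position (find_last_headers_before text position)

-- ===== LEMMAS AND PROOFS =====

-- the h1 component of B's scan does not depend on the h2/h3 accumulators
lemma pvScanB_fst (M : List (List Char)) :
    ∀ a b a' b', (pvScanB M a b).1 = (pvScanB M a' b').1 := by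
  induction M with
  | nil => intro a b a' b'; rfl
  | cons x rest ih =>
    intro a b a' b'
    simp only [pvScanB]
    split_ifs <;> first | rfl | exact ih _ _ _ _

-- once h2 is set, B's scan freezes h2 and h3
lemma pvScanB_frozen (M : List (List Char)) :
    ∀ s h3a, pvScanB M (some s) h3a = ((pvScanB M none none).1, some s, h3a) := by
  induction M with
  | nil => intro s h3a; rfl
  | cons x rest ih =>
    intro s h3a
    by_cases h1 : pvIsH1 (PySem.Chars.strip x) = true
    · simp [pvScanB, h1]
    · by_cases h2 : pvIsH2 (PySem.Chars.strip x) = true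
      · simp [pvScanB, h1, h2, ih]
      · by_cases h3 : pvIsH3 (PySem.Chars.strip x) = true
        · simp [pvScanB, h1, h2, h3, ih, pvScanB_fst rest none (some (PySem.Chars.strip x)) none none]
        · simp [pvScanB, h1, h2, h3, ih]

-- with h2 unset but h3 set, B's scan freezes h3 and computes h1/h2 as from scratch
lemma pvScanB_h3 (M : List (List Char)) :
    ∀ s', pvScanB M none (some s') =
      ((pvScanB M none none).1, (pvScanB M none none).2.1, some s') := by
  induction M with
  | nil => intro s'; rfl
  | cons x rest ih =>
    intro s'
    by_cases h1 : pvIsH1 (PySem.Chars.strip x) = true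
    · simp [pvScanB, h1]
    · by_cases h2 : pvIsH2 (PySem.Chars.strip x) = true
      · simp [pvScanB, h1, h2, pvScanB_frozen]
      · by_cases h3 : pvIsH3 (PySem.Chars.strip x) = true
        · simp [pvScanB, h1, h2, h3, ih]
        · simp [pvScanB, h1, h2, h3, ih]

-- A's forward fold equals B's backward scan
lemma pvState_eq (L : List (List Char)) :
    L.foldl pvStepA (none, none, none) = pvScanB L.reverse none none := by
  induction L using List.reverseRecOn with
  | nil => rfl
  | append_singleton M x ih =>
    rw [List.foldl_append, List.reverse_append]
    simp only [List.foldl_cons, List.foldl_nil, List.reverse_singleton, List.singleton_append]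
    by_cases h1 : pvIsH1 (PySem.Chars.strip x) = true
    · simp [pvStepA, pvScanB, h1]
    · by_cases h2 : pvIsH2 (PySem.Chars.strip x) = true
      · simp [pvStepA, pvScanB, h1, h2, pvScanB_frozen, ih]
      · by_cases h3 : pvIsH3 (PySem.Chars.strip x) = true
        · simp [pvStepA, pvScanB, h1, h2, h3, pvScanB_h3, ih]
        · simp [pvStepA, pvScanB, h1, h2, h3, ih]

-- the two tails produce the same parts list from equal states
lemma pvTail_eq (h1 h2 h3 : Option (List Char)) :
    pvAppendIf (pvAppendIf (pvAppendIf [] h1) h2) h3 =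
      ([h1, h2, h3].filterMap id).filter (fun l => !l.isEmpty) := by
  cases h1 <;> cases h2 <;> cases h3 <;>
    simp [pvAppendIf] <;> split_ifs <;> simp_all

-- ===== VERDICT (by name: the statement is the Claim_ definition above) =====
theorem find_last_headers_before_spec : Claim_equal_find_last_headers_before := by
  intro text position _
  unfold Spec_find_last_headers_before
  simp only [find_last_headers_before, find_last_headers_before_alt, pvState_eq, pvTail_eq]
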